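-- pv_equiv track=rewrite | github.com/Mariovr/AdventOfCode | day18.py | count_points
-- ===== SOURCE A (Python) =====
-- def count_points(grid):
--     result = 0
--     for line in grid:
--         result += line.count('-')
--         result += line.count('|')
--         result += line.count('F')
--         result += line.count('J')
--         result += line.count('L')
--         result += line.count('7')
--     return result
-- ===== SOURCE B (Python) =====
-- def count_points(grid):
--     # Build one character histogram of the whole grid, then read off the six pipe chars.
--     freq = {}
--     for line in grid:
--         for c in line:
--             freq[c] = freq.get(c, 0) + 1
--     return sum(freq.get(c, 0) for c in '-|FJL7')
-- ===== Notes on version B (the rewrite author's own statement) =====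
-- stated objective: alternative
-- what changed: B builds a full character-frequency histogram of the grid in one pass and then returns the sum of six dictionary lookups, instead of A's six repeated count-scans over every line.
import Mathlib
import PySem

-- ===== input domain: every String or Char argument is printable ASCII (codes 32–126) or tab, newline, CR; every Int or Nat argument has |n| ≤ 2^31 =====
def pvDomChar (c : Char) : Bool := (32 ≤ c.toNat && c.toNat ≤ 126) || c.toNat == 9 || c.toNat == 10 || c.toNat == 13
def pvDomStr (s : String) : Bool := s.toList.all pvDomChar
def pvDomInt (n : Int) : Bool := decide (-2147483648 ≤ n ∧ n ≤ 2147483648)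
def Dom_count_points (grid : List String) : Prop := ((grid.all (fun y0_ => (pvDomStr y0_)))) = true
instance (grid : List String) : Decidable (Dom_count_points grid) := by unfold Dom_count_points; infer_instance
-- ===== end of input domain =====

-- B builds one character-frequency dictionary over the whole grid and sums six lookups,
-- instead of A's six count-scans per line (objective: alternative algorithm/data structure).


-- ===== PORT A =====
def count_points (grid : List String) : Int :=
  grid.foldl (fun result line =>
    result + (PySem.Str.count line "-" : Int)
           + (PySem.Str.count line "|" : Int)
           + (PySem.Str.count line "F" : Int)
           + (PySem.Str.count line "J" : Int)
           + (PySem.Str.count line "L" : Int)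
           + (PySem.Str.count line "7" : Int)) 0

-- ===== PORT B =====
-- freq = {}; for line in grid: for c in line: freq[c] = freq.get(c, 0) + 1
def pvFreq (grid : List String) : PySem.Dict Char Int :=
  grid.foldl (fun d line =>
    line.toList.foldl (fun d c => d.insert c (d.getD c 0 + 1)) d) PySem.Dict.empty

-- return sum(freq.get(c, 0) for c in '-|FJL7')
def count_points_alt (grid : List String) : Int :=
  let freq := pvFreq grid
  ("-|FJL7".toList).foldl (fun acc c => acc + freq.getD c 0) 0

-- ===== PRECONDITION & SPEC =====
def Spec_count_points (grid : List String) (out : Int) : Prop := out = count_points_alt grid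
instance (grid : List String) (out : Int) : Decidable (Spec_count_points grid out) := by unfold Spec_count_points; infer_instance

-- ===== CLAIM (what is proved, stated in full; the proofs are below) =====
def Claim_equal_count_points : Prop := ∀ (grid : List String), Dom_count_points grid → Spec_count_points grid (count_points grid)

-- ===== LEMMAS AND PROOFS =====

-- Str.count with a single-character needle is a plain List.count
theorem pv_go_singleton (c : Char) : ∀ (fuel : Nat) (s : List Char) (acc : Nat), s.length ≤ fuel →
    PySem.Chars.count.go [c] fuel s acc = acc + s.count c := by
  intro fuel
  induction fuel with
  | zero => intro s acc h; cases s with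
    | nil => simp [PySem.Chars.count.go]
    | cons a t => simp at h
  | succ n ih =>
    intro s acc h
    cases s with
    | nil => simp [PySem.Chars.count.go]
    | cons a t =>
      rw [PySem.Chars.count.go]
      by_cases hc : c = a
      · subst hc
        simp only [List.isPrefixOf, Bool.and_true, beq_self_eq_true, if_pos,
          List.count_cons_self, List.length_singleton, List.drop_one, List.tail_cons]
        rw [ih t (acc+1) (by simpa using h)]
        omega
      · have hp : [c].isPrefixOf (a :: t) = false := by
          simp [List.isPrefixOf]; exact hc
        rw [hp, if_neg (by simp), ih t acc (by simpa using h)]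
        simp [List.count_cons]
        intro h'; exact absurd h'.symm hc

theorem pv_count_singleton (s : List Char) (c : Char) : PySem.Chars.count s [c] = s.count c := by
  have := pv_go_singleton c s.length s 0 le_rfl
  simpa [PySem.Chars.count] using this

-- A's fold, characterised: acc + the six per-character counts of the concatenation
theorem pv_A_eq (grid : List String) (acc : Int) :
    grid.foldl (fun result line =>
      result + (PySem.Str.count line "-" : Int)
             + (PySem.Str.count line "|" : Int)
             + (PySem.Str.count line "F" : Int)
             + (PySem.Str.count line "J" : Int)
             + (PySem.Str.count line "L" : Int)
             + (PySem.Str.count line "7" : Int)) acc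
    = acc + (let fl := grid.flatMap (fun line => line.toList)
        ((fl.count '-' : Int) + fl.count '|' + fl.count 'F' + fl.count 'J' + fl.count 'L' + fl.count '7')) := by
  induction grid generalizing acc with
  | nil => simp
  | cons s t ih =>
    simp only [List.foldl_cons, List.flatMap_cons, List.count_append]
    rw [ih]
    have h : ∀ sub : String, PySem.Str.count s sub = PySem.Chars.count s.toList sub.toList := by
      intro sub; simp [PySem.Str.count_eq]
    simp only [h, show ("-" : String).toList = ['-'] from rfl,
      show ("|" : String).toList = ['|'] from rfl, show ("F" : String).toList = ['F'] from rfl,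
      show ("J" : String).toList = ['J'] from rfl, show ("L" : String).toList = ['L'] from rfl,
      show ("7" : String).toList = ['7'] from rfl, pv_count_singleton]
    push_cast
    ring

-- B's histogram, characterised: each lookup is the count of that char in the concatenation
theorem pv_freq_getD (grid : List String) (c : Char) :
    ∀ (d : PySem.Dict Char Int),
    (grid.foldl (fun d line =>
      line.toList.foldl (fun d c => d.insert c (d.getD c 0 + 1)) d) d).getD c 0
    = d.getD c 0 + ((grid.flatMap (fun line => line.toList)).count c : Int) := by
  induction grid with
  | nil => intro d; simp
  | cons s t ih =>
    intro d
    simp only [List.foldl_cons, List.flatMap_cons, List.count_append]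
    rw [ih, PySem.Dict.getD_foldl_insert_add_one]
    push_cast
    ring

-- ===== VERDICT (by name: the statement is the Claim_ definition above) =====
theorem count_points_spec : Claim_equal_count_points := by
  intro grid _
  unfold Spec_count_points count_points count_points_alt pvFreq
  rw [pv_A_eq]
  have h := fun c => pv_freq_getD grid c PySem.Dict.empty
  simp only [PySem.Dict.getD_empty] at h
  simp only [show ("-|FJL7" : String).toList = ['-','|','F','J','L','7'] from rfl,
    List.foldl_cons, List.foldl_nil, h]
  ring
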